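-- pv_equiv track=rewrite | github.com/SorenHJohansen/SattLint | src/sattlint/docgenerator/classification.py | _equals_pattern
-- ===== SOURCE A (Python) =====
-- def _equals_pattern(text: str, patterns: list[str]) -> bool:
--     text_variants = _label_variants(text)
--     for pattern in patterns:
--         if not pattern:
--             continue
--         if text_variants & _label_variants(pattern):
--             return True
--     return False
--
-- def _label_variants(text: str) -> set[str]:
--     text_cf = text.casefold().strip()
--     if not text_cf:
--         return set()
--     variants = {text_cf}
--     if ":" in text_cf:
--         variants.add(text_cf.split(":", 1)[-1])
--     return variants
-- ===== SOURCE B (Python) =====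
-- def _equals_pattern(text: str, patterns: list[str]) -> bool:
--     all_variants = set()
--     for pattern in patterns:
--         all_variants |= _label_variants(pattern)
--     return bool(_label_variants(text) & all_variants)
--
-- def _label_variants(text: str) -> set[str]:
--     text_cf = text.casefold().strip()
--     if not text_cf:
--         return set()
--     variants = {text_cf}
--     if ":" in text_cf:
--         variants.add(text_cf.split(":", 1)[-1])
--     return variants
-- ===== Notes on version B (the rewrite author's own statement) =====
-- stated objective: alternative
-- what changed: B first aggregates the label variants of all patterns into one union set and then tests the text's variants against that single index with one intersection, instead of A's per-pattern loop that intersects and early-exits.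
import Mathlib
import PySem

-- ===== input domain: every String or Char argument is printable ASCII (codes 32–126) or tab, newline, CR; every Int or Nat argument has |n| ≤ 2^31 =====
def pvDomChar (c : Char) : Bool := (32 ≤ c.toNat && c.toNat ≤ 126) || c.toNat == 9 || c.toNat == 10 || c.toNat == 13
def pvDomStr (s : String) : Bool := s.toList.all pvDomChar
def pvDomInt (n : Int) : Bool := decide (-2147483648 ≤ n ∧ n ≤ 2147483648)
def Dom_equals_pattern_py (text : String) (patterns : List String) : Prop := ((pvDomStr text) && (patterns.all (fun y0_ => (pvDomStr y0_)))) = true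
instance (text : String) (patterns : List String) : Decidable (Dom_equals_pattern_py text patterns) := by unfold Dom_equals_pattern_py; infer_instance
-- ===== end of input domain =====

-- B aggregates every pattern's label variants into one union set and tests the text's
-- variants against that single index with one intersection, instead of A's per-pattern
-- loop with early exit; same cost, different structure.


-- ===== PORT A =====
-- shared helper _label_variants (casefold = lower on the ASCII domain)
def labelVariants (text : String) : PySem.Set String :=
  let text_cf := PySem.Str.strip (PySem.Str.lower text)
  if text_cf = "" then PySem.Set.empty
  else
    let variants : PySem.Set String := PySem.Set.ofList [text_cf]
    if PySem.Str.isIn ":" text_cf then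
      PySem.Set.add variants
        (PySem.List.pyGetD ((PySem.Str.splitMax? text_cf ":" 1).getD []) (-1) "")
    else variants

-- A's for-loop over patterns with early return
def eqPatLoop (text_variants : PySem.Set String) : List String → Bool
  | [] => false
  | pattern :: rest =>
    if pattern = "" then eqPatLoop text_variants rest
    else if !(PySem.Set.inter text_variants (labelVariants pattern)).isEmpty then true
    else eqPatLoop text_variants rest

def equals_pattern_py (text : String) (patterns : List String) : Bool :=
  eqPatLoop (labelVariants text) patterns

-- ===== PORT B =====
def equals_pattern_py_alt (text : String) (patterns : List String) : Bool :=
  let all_variants :=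
    patterns.foldl (fun s pattern => PySem.Set.union s (labelVariants pattern)) PySem.Set.empty
  !(PySem.Set.inter (labelVariants text) all_variants).isEmpty

-- ===== PRECONDITION & SPEC =====
def Spec_equals_pattern_py (text : String) (patterns : List String) (out : Bool) : Prop := out = equals_pattern_py_alt text patterns
instance (text : String) (patterns : List String) (out : Bool) : Decidable (Spec_equals_pattern_py text patterns out) := by unfold Spec_equals_pattern_py; infer_instance

-- ===== CLAIM (what is proved, stated in full; the proofs are below) =====
def Claim_equal_equals_pattern_py : Prop := ∀ (text : String) (patterns : List String), Dom_equals_pattern_py text patterns → Spec_equals_pattern_py text patterns (equals_pattern_py text patterns)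

-- ===== LEMMAS AND PROOFS =====

-- a nonempty intersection is an `any` over the left set's elements
theorem interNE (tv X : PySem.Set String) :
    (!(PySem.Set.inter tv X).isEmpty) = tv.any (fun x => PySem.Set.contains X x) := by
  induction tv with
  | nil => rfl
  | cons h t ih =>
    show (!(List.filter (fun x => PySem.Set.contains X x) (h :: t)).isEmpty) = _
    rw [List.filter_cons, List.any_cons]
    cases hc : PySem.Set.contains X h
    · rw [if_neg (by simp [hc]), Bool.false_or]
      exact ih
    · rw [if_pos (by simp [hc]), Bool.true_or]
      rfl

theorem contains_union (s t : PySem.Set String) (x : String) :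
    PySem.Set.contains (PySem.Set.union s t) x = (PySem.Set.contains s x || PySem.Set.contains t x) := by
  have hmem : (PySem.Set.contains (PySem.Set.union s t) x = true)
      ↔ ((PySem.Set.contains s x || PySem.Set.contains t x) = true) := by
    simp [PySem.Set.contains_iff, PySem.Set.mem_union]
  cases hu : PySem.Set.contains (PySem.Set.union s t) x
  · cases hv : (PySem.Set.contains s x || PySem.Set.contains t x)
    · rfl
    · rw [hu, hv] at hmem; simp at hmem
  · exact (hmem.mp hu).symm

theorem any_union (tv s t : PySem.Set String) :
    tv.any (fun x => PySem.Set.contains (PySem.Set.union s t) x)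
      = (tv.any (fun x => PySem.Set.contains s x) || tv.any (fun x => PySem.Set.contains t x)) := by
  induction tv with
  | nil => rfl
  | cons h rest ih =>
    simp only [List.any_cons, ih]
    rw [contains_union]
    generalize PySem.Set.contains s h = a
    generalize PySem.Set.contains t h = b
    generalize (rest.any fun x => PySem.Set.contains s x) = u
    generalize (rest.any fun x => PySem.Set.contains t x) = v
    cases a <;> cases b <;> cases u <;> cases v <;> rfl

theorem labelVariants_empty : labelVariants "" = PySem.Set.empty := by decide

-- the loop of A, seeded with any accumulator, equals B's union-then-intersect
theorem loop_foldl (tv : PySem.Set String) (l : List String) (acc : PySem.Set String) :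
    ((!(PySem.Set.inter tv acc).isEmpty) || eqPatLoop tv l)
      = !(PySem.Set.inter tv
            (l.foldl (fun s p => PySem.Set.union s (labelVariants p)) acc)).isEmpty := by
  induction l generalizing acc with
  | nil => simp [eqPatLoop]
  | cons p rest ih =>
    rw [List.foldl_cons, ← ih]
    by_cases hp : p = ""
    · subst hp
      simp [eqPatLoop, interNE, labelVariants_empty, PySem.Set.empty]
    · simp only [eqPatLoop, hp, if_false, interNE, any_union]
      generalize (tv.any fun x => PySem.Set.contains acc x) = a
      generalize (tv.any fun x => PySem.Set.contains (labelVariants p) x) = b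
      generalize eqPatLoop tv rest = c
      cases a <;> cases b <;> cases c <;> rfl

-- ===== VERDICT (by name: the statement is the Claim_ definition above) =====
theorem equals_pattern_py_spec : Claim_equal_equals_pattern_py := by
  intro text patterns _
  unfold Spec_equals_pattern_py equals_pattern_py equals_pattern_py_alt
  rw [← loop_foldl]
  simp [PySem.Set.inter, PySem.Set.empty]
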